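-- pv_equiv track=rewrite | github.com/diyorbekbaxromovv/Python-5-month-NT | 7-lesson selection sort/homework/ex4.py | raqam
-- ===== SOURCE A (Python) =====
-- def raqam(numl, n):
--     borraqam = set()
--     for num in numl:
--         if isinstance(num, int) and 0 <= num <= n:
--             borraqam.add(num)
--     for digit in range(n + 1):
--         if digit not in borraqam:
--             numl.append(digit)
--             return numl
--     return numl
-- ===== SOURCE B (Python) =====
-- def raqam(numl, n):
--     cands = sorted(v for v in numl if isinstance(v, int) and 0 <= v <= n)
--     expected = 0
--     for v in cands:
--         if v == expected:
--             expected += 1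
--         elif v > expected:
--             break
--         # v < expected: duplicate already counted, skip
--     if expected <= n:
--         numl.append(expected)
--     return numl
-- ===== Notes on version B (the rewrite author's own statement) =====
-- stated objective: alternative
-- what changed: B finds the smallest missing value in 0..n by one scan of the sorted in-range elements (a mex scan) instead of building a set and probing every digit of range(n+1) against it.
import Mathlib
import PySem

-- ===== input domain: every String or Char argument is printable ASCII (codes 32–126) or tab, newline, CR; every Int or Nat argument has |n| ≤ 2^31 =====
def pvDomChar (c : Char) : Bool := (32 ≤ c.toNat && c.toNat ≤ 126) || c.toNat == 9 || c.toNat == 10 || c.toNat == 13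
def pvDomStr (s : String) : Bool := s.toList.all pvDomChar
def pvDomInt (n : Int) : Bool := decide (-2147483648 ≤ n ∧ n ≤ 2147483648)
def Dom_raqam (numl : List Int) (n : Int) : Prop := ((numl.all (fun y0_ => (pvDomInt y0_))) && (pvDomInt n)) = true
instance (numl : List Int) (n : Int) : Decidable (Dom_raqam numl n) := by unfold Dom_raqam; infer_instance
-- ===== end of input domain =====

-- B replaces A's set-plus-probe-every-digit search by a single mex scan over the sorted
-- in-range elements.  Both Pythons append to numl in place; the theorems are about the return value
-- (which IS the mutated list).

-- ===== PORT A =====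
-- second loop of A: for digit in range(n+1): if digit not in borraqam: numl.append(digit); return numl
-- `for digit in range(n+1)` with an early return, as a counter recursion (range is lazy in Python)
def raqamLoop (numl : List Int) (bor : PySem.Set Int) (d stop : Int) : List Int :=
  if d < stop then
    if d ∈ bor then raqamLoop numl bor (d + 1) stop else numl ++ [d]
  else numl
termination_by (stop - d).toNat
decreasing_by omega

def raqam (numl : List Int) (n : Int) : List Int :=
  -- isinstance(num, int) is always true for an Int element, so only the bound test remains
  let borraqam : PySem.Set Int :=
    numl.foldl (fun s num => if 0 ≤ num ∧ num ≤ n then PySem.Set.add s num else s) PySem.Set.empty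
  raqamLoop numl borraqam 0 (n + 1)

-- ===== PORT B =====
-- B's scan: walk the sorted candidates, counting up `expected`; stop at the first gap
def mexScan (expected : Int) : List Int → Int
  | [] => expected
  | v :: vs =>
      if v = expected then mexScan (expected + 1) vs
      else if v > expected then expected
      else mexScan expected vs          -- v < expected: duplicate, skip

def raqam_alt (numl : List Int) (n : Int) : List Int :=
  let cands := PySem.List.sorted (numl.filter (fun v => decide (0 ≤ v ∧ v ≤ n))) (fun x => x) false
  let expected := mexScan 0 cands
  if expected ≤ n then numl ++ [expected] else numl

-- ===== PRECONDITION & SPEC =====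
def Spec_raqam (numl : List Int) (n : Int) (out : List Int) : Prop := out = raqam_alt numl n
instance (numl : List Int) (n : Int) (out : List Int) : Decidable (Spec_raqam numl n out) := by unfold Spec_raqam; infer_instance

-- ===== CLAIM (what is proved, stated in full; the proofs are below) =====
def Claim_equal_raqam : Prop := ∀ (numl : List Int) (n : Int), Dom_raqam numl n → Spec_raqam numl n (raqam numl n)

-- ===== LEMMAS AND PROOFS =====

-- membership in A's set: exactly the elements of numl lying in [0, n]
theorem mem_bor_aux (n : Int) (xs : List Int) (s : PySem.Set Int) (x : Int) :
    x ∈ xs.foldl (fun s num => if 0 ≤ num ∧ num ≤ n then PySem.Set.add s num else s) s ↔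
      x ∈ s ∨ (x ∈ xs ∧ 0 ≤ x ∧ x ≤ n) := by
  induction xs generalizing s with
  | nil => simp
  | cons a as ih =>
      simp only [List.foldl_cons, ih]
      split_ifs with h
      · simp only [PySem.Set.mem_add, List.mem_cons]
        constructor
        · rintro ((hs | rfl) | hr)
          · exact Or.inl hs
          · exact Or.inr ⟨Or.inl rfl, h⟩
          · exact Or.inr ⟨Or.inr hr.1, hr.2⟩
        · rintro (hs | ⟨(rfl | hm), hb⟩)
          · exact Or.inl (Or.inl hs)
          · exact Or.inl (Or.inr rfl)
          · exact Or.inr ⟨hm, hb⟩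
      · simp only [List.mem_cons]
        constructor
        · rintro (hs | hr)
          · exact Or.inl hs
          · exact Or.inr ⟨Or.inr hr.1, hr.2⟩
        · rintro (hs | ⟨(rfl | hm), hb⟩)
          · exact Or.inl hs
          · exact absurd hb h
          · exact Or.inr ⟨hm, hb⟩

-- characterization of B's scan on a sorted list
theorem mexScan_char (l : List Int) (hl : l.Pairwise (· ≤ ·)) :
    ∀ e : Int, e ≤ mexScan e l ∧ mexScan e l ∉ l ∧
      ∀ k : Int, e ≤ k → k < mexScan e l → k ∈ l := by
  induction l with
  | nil => intro e; simp [mexScan]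
  | cons v vs ih =>
      intro e
      have hvs := List.Pairwise.of_cons hl
      have hvall : ∀ y ∈ vs, v ≤ y := fun y hy => (List.pairwise_cons.mp hl).1 y hy
      simp only [mexScan]
      split_ifs with h1 h2
      · -- v = e
        obtain ⟨hle, hnm, hall⟩ := ih hvs (e + 1)
        subst h1
        refine ⟨by omega, ?_, ?_⟩
        · simp only [List.mem_cons, not_or]
          exact ⟨by omega, hnm⟩
        · intro k hk1 hk2
          rcases eq_or_lt_of_le hk1 with rfl | hk
          · exact List.mem_cons_self
          · exact List.mem_cons_of_mem _ (hall k (by omega) hk2)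
      · -- v > e : return e
        refine ⟨le_refl e, ?_, fun k hk1 hk2 => absurd hk1 (by omega)⟩
        simp only [List.mem_cons, not_or]
        exact ⟨by omega, fun hmem => by have := hvall e hmem; omega⟩
      · -- v < e : skip
        obtain ⟨hle, hnm, hall⟩ := ih hvs e
        refine ⟨hle, ?_, fun k hk1 hk2 => List.mem_cons_of_mem _ (hall k hk1 hk2)⟩
        simp only [List.mem_cons, not_or]
        exact ⟨by omega, hnm⟩

-- A's probe loop, run from a, lands on the unique value r characterized by the mex property
theorem raqamLoop_char (numl : List Int) (n : Int) (bor : PySem.Set Int) (r : Int)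
    (hr : r ∉ bor) :
    ∀ a : Int, a ≤ r → (∀ k : Int, a ≤ k → k < r → k ∈ bor) →
      raqamLoop numl bor a (n + 1) =
        if r ≤ n then numl ++ [r] else numl := by
  intro a
  induction hfuel : (n + 1 - a).toNat generalizing a with
  | zero =>
      intro har hall
      rw [raqamLoop, if_neg (by omega), if_neg (by omega)]
  | succ m ih =>
      intro har hall
      have hlt : a < n + 1 := by omega
      rw [raqamLoop, if_pos hlt]
      by_cases hmem : a ∈ bor
      · rw [if_pos hmem]
        have hane : a ≠ r := fun h => hr (h ▸ hmem)
        have h1 : a + 1 ≤ r := by omega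
        have h2 : ∀ k : Int, a + 1 ≤ k → k < r → k ∈ bor := by
          intro k hk1 hk2; exact hall k (by omega) hk2
        exact ih (a + 1) (by omega) h1 h2
      · rw [if_neg hmem]
        have : a = r := by
          rcases eq_or_lt_of_le har with h | h
          · exact h
          · exact absurd (hall a le_rfl h) hmem
        subst this
        rw [if_pos (by omega)]

-- ===== VERDICT (by name: the statement is the Claim_ definition above) =====
theorem raqam_spec : Claim_equal_raqam := by
  intro numl n _
  unfold Spec_raqam raqam raqam_alt
  set cands := PySem.List.sorted (numl.filter (fun v => decide (0 ≤ v ∧ v ≤ n))) (fun x => x) false with hc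
  set bor := numl.foldl (fun s num => if 0 ≤ num ∧ num ≤ n then PySem.Set.add s num else s)
      PySem.Set.empty with hb
  have hmem : ∀ x : Int, x ∈ cands ↔ x ∈ bor := by
    intro x
    rw [hc, PySem.List.mem_sorted, List.mem_filter, hb, mem_bor_aux]
    simp [PySem.Set.empty]
  have hsorted : cands.Pairwise (· ≤ ·) := PySem.List.sorted_pairwise _ _
  obtain ⟨h0, hnm, hall⟩ := mexScan_char cands hsorted 0
  set e := mexScan 0 cands with he
  have := raqamLoop_char numl n bor e (fun h => hnm ((hmem e).mpr h)) 0 h0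
      (fun k hk1 hk2 => (hmem k).mp (hall k hk1 hk2))
  simpa using this
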